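-- pv_equiv track=rewrite | github.com/sakshamthukral/DSA | leetcode/streak/timeToMakeRopeColorful.py | minCostOptimized
-- ===== SOURCE A (Python) =====
-- from typing import List
--
-- def minCostOptimized(colors:str, neededTime:List[int])->int:
--     minTime = 0
--     i=1
--     while i < len(colors):
--         if colors[i-1] == colors[i]:
--             currColorMaxTime = 0
--             currTime = neededTime[i-1]
--             while i<len(colors) and colors[i-1] == colors[i]:
--                 currColorMaxTime = max(neededTime[i-1],neededTime[i],currColorMaxTime)
--                 currTime+=neededTime[i]
--                 i+=1
--             minTime+=(currTime-currColorMaxTime) # as we are removing all consecutives, keeping only the one with highest removal time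
--         else:
--             i+=1
--     return minTime
-- ===== SOURCE B (Python) =====
-- def minCostOptimized(colors, neededTime):
--     total = 0
--     runMax = 0
--     i = 1
--     while i < len(colors):
--         if colors[i] == colors[i - 1]:
--             if i == 1 or colors[i - 2] != colors[i - 1]:
--                 runMax = neededTime[i - 1]
--             total += min(runMax, neededTime[i])
--             runMax = max(runMax, neededTime[i])
--         i += 1
--     return total
-- ===== Notes on version B (the rewrite author's own statement) =====
-- stated objective: simpler
-- what changed: Replaced A's nested grouping while-loop (inner scan per run of equal colors, summing and taking the run max) by a single flat pass that keeps a running maximum and adds min(runMax, neededTime[i]) at each equal-adjacent pair.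
-- outside the precondition, e.g. on minCostOptimized('aa', [-3, -5]): A returns -8, B returns -5
import Mathlib
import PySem

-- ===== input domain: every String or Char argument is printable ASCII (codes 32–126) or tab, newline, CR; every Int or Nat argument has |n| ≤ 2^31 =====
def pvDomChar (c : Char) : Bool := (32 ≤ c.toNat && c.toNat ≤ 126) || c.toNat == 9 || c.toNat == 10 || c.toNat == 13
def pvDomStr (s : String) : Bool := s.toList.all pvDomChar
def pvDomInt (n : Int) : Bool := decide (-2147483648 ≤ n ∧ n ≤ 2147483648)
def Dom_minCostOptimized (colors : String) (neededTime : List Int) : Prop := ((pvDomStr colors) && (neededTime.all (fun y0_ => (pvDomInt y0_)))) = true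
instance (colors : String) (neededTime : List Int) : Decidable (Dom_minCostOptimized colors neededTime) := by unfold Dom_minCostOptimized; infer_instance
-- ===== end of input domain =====

-- B replaces A's nested run-grouping loop by a single flat pass with a running maximum (objective: simpler).
-- Loops are ported with a fuel parameter (fuel = cs.length, always sufficient) purely as a totality guard.

-- ===== PORT A =====
-- inner while loop of A: while i < len(colors) and colors[i-1] == colors[i]: update (currTime, currColorMaxTime, i)
-- List.getD is exact here: Pre_ guarantees every index A reads is in range
def innerA (cs : List Char) (nt : List Int) : Nat → Nat → Int → Int → Int × Int × Nat
  | 0, i, cm, ct => (ct, cm, i)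
  | fuel+1, i, cm, ct =>
    if i < cs.length ∧ cs.getD (i-1) ' ' = cs.getD i ' ' then
      innerA cs nt fuel (i+1) (max (max (nt.getD (i-1) 0) (nt.getD i 0)) cm) (ct + nt.getD i 0)
    else (ct, cm, i)

-- outer while loop of A
def outerA (cs : List Char) (nt : List Int) : Nat → Nat → Int → Int
  | 0, _, mt => mt
  | fuel+1, i, mt =>
    if i < cs.length then
      if cs.getD (i-1) ' ' = cs.getD i ' ' then
        let r := innerA cs nt cs.length i 0 (nt.getD (i-1) 0)
        outerA cs nt fuel r.2.2 (mt + (r.1 - r.2.1))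
      else outerA cs nt fuel (i+1) mt
    else mt

def minCostOptimized (colors : String) (neededTime : List Int) : Int :=
  outerA colors.toList neededTime colors.toList.length 1 0

-- ===== PORT B =====
-- flat single pass of Source B: one loop over i, running maximum reset at a run start
def loopB (cs : List Char) (nt : List Int) : Nat → Nat → Int → Int → Int
  | 0, _, total, _ => total
  | fuel+1, i, total, rm =>
    if i < cs.length then
      if cs.getD i ' ' = cs.getD (i-1) ' ' then
        let rm' := if i = 1 ∨ cs.getD (i-2) ' ' ≠ cs.getD (i-1) ' ' then nt.getD (i-1) 0 else rm
        loopB cs nt fuel (i+1) (total + min rm' (nt.getD i 0)) (max rm' (nt.getD i 0))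
      else loopB cs nt fuel (i+1) total rm
    else total

def minCostOptimized_alt (colors : String) (neededTime : List Int) : Int :=
  loopB colors.toList neededTime colors.toList.length 1 0 0

-- ===== PRECONDITION & SPEC =====
-- Pre_ excludes inputs where an index adjacent to an equal-color pair is out of range for neededTime
-- (there A raises IndexError, and so does B) and inputs with a negative removal time next to an
-- equal-color pair: negative times are outside the task's natural domain (LeetCode guarantees
-- neededTime[i] ≥ 1), and there A's zero-initialised run maximum floors the kept time at 0.
def Pre_minCostOptimized (colors : String) (neededTime : List Int) : Prop :=
  ∀ i : Nat, i < colors.toList.length → 1 ≤ i →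
    colors.toList.getD (i-1) ' ' = colors.toList.getD i ' ' →
    (i < neededTime.length ∧ 0 ≤ neededTime.getD (i-1) 0 ∧ 0 ≤ neededTime.getD i 0)
instance (colors : String) (neededTime : List Int) : Decidable (Pre_minCostOptimized colors neededTime) := by
  unfold Pre_minCostOptimized; infer_instance

def pvWitness_minCostOptimized : String × List Int := ("aab", [1, 2, 3])

def Spec_minCostOptimized (colors : String) (neededTime : List Int) (out : Int) : Prop := out = minCostOptimized_alt colors neededTime
instance (colors : String) (neededTime : List Int) (out : Int) : Decidable (Spec_minCostOptimized colors neededTime out) := by unfold Spec_minCostOptimized; infer_instance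

-- ===== CLAIM (what is proved, stated in full; the proofs are below) =====
def Claim_equal_minCostOptimized : Prop := ∀ (colors : String) (neededTime : List Int), Dom_minCostOptimized colors neededTime → Pre_minCostOptimized colors neededTime → Spec_minCostOptimized colors neededTime (minCostOptimized colors neededTime)

-- ===== LEMMAS AND PROOFS =====

theorem loopB_stop (cs : List Char) (nt : List Int) (f i : Nat) (t rm : Int)
    (h : ¬ i < cs.length) : loopB cs nt f i t rm = t := by
  cases f <;> simp [loopB, h]

-- any sufficient fuel computes the same value
theorem loopB_fuel (cs : List Char) (nt : List Int) :
    ∀ (f1 f2 i : Nat) (t rm : Int), cs.length - i ≤ f1 → cs.length - i ≤ f2 →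
      loopB cs nt f1 i t rm = loopB cs nt f2 i t rm := by
  intro f1
  induction f1 with
  | zero =>
    intro f2 i t rm hf1 _
    rw [loopB_stop cs nt f2 i t rm (by omega)]
    rfl
  | succ a ih =>
    intro f2 i t rm hf1 hf2
    by_cases hi : i < cs.length
    · obtain ⟨b, rfl⟩ : ∃ b, f2 = b + 1 := ⟨f2 - 1, by omega⟩
      simp only [loopB, if_pos hi]
      split
      · exact ih b (i+1) _ _ (by omega) (by omega)
      · exact ih b (i+1) _ _ (by omega) (by omega)
    · rw [loopB_stop cs nt _ i t rm hi, loopB_stop cs nt _ i t rm hi]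

-- After the first step of a run, A's inner loop state (cm = running max, ct = running sum)
-- corresponds to B's flat steps: each further step adds min cm b to the total where rm = cm.
theorem innerChar (cs : List Char) (nt : List Int) :
    ∀ (f j : Nat) (ct cm : Int), cs.length - j ≤ f → 2 ≤ j →
      cs.getD (j-2) ' ' = cs.getD (j-1) ' ' → nt.getD (j-1) 0 ≤ cm →
    j ≤ (innerA cs nt f j cm ct).2.2 ∧
    ¬((innerA cs nt f j cm ct).2.2 < cs.length ∧
       cs.getD ((innerA cs nt f j cm ct).2.2 - 1) ' ' = cs.getD (innerA cs nt f j cm ct).2.2 ' ') ∧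
    ∀ tt0 : Int, loopB cs nt cs.length j tt0 cm =
      loopB cs nt cs.length (innerA cs nt f j cm ct).2.2
        (tt0 + ((innerA cs nt f j cm ct).1 - ct) - ((innerA cs nt f j cm ct).2.1 - cm))
        (innerA cs nt f j cm ct).2.1 := by
  intro f
  induction f with
  | zero =>
    intro j ct cm hf h2 hprev hcm
    simp only [innerA]
    refine ⟨le_refl j, fun hc => by omega, fun tt0 => ?_⟩
    have : tt0 + (ct - ct) - (cm - cm) = tt0 := by ring
    rw [this]
  | succ a ih =>
    intro j ct cm hf h2 hprev hcm
    by_cases h : j < cs.length ∧ cs.getD (j-1) ' ' = cs.getD j ' '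
    · have e1 : j + 1 - 2 = j - 1 := by omega
      have e2 : j + 1 - 1 = j := by omega
      have hmaxeq : max (max (nt.getD (j-1) 0) (nt.getD j 0)) cm = max cm (nt.getD j 0) := by
        rw [max_assoc, max_comm (nt.getD j 0) cm]
        exact max_eq_right (le_trans hcm (le_max_left cm (nt.getD j 0)))
      simp only [innerA, if_pos h]
      rw [hmaxeq]
      have key := ih (j+1) (ct + nt.getD j 0)
          (max (max (nt.getD (j-1) 0) (nt.getD j 0)) cm) (by omega) (by omega)
          (by rw [e1, e2]; exact h.2)
          (by rw [e2]; exact le_trans (le_max_right _ _) (le_max_left _ _))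
      rw [hmaxeq] at key
      obtain ⟨k1, k2, k3⟩ := key
      refine ⟨by omega, k2, ?_⟩
      intro tt0
      obtain ⟨c, hc⟩ : ∃ c, cs.length = c + 1 := ⟨cs.length - 1, by omega⟩
      conv_lhs => rw [hc]
      simp only [loopB, if_pos h.1, if_pos h.2.symm]
      have hreset : ¬(j = 1 ∨ cs.getD (j-2) ' ' ≠ cs.getD (j-1) ' ') := by
        push Not
        exact ⟨by omega, hprev⟩
      rw [if_neg hreset]
      rw [loopB_fuel cs nt c cs.length (j+1) _ _ (by omega) (by omega)]
      rw [k3 (tt0 + min cm (nt.getD j 0))]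
      have hmm : min cm (nt.getD j 0) + max cm (nt.getD j 0) = cm + nt.getD j 0 :=
        min_add_max cm (nt.getD j 0)
      have hacc : tt0 + min cm (nt.getD j 0)
            + ((innerA cs nt a (j+1) (max cm (nt.getD j 0)) (ct + nt.getD j 0)).1 - (ct + nt.getD j 0))
            - ((innerA cs nt a (j+1) (max cm (nt.getD j 0)) (ct + nt.getD j 0)).2.1 - max cm (nt.getD j 0))
          = tt0 + ((innerA cs nt a (j+1) (max cm (nt.getD j 0)) (ct + nt.getD j 0)).1 - ct)
            - ((innerA cs nt a (j+1) (max cm (nt.getD j 0)) (ct + nt.getD j 0)).2.1 - cm) := by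
        omega
      rw [hacc]
    · simp only [innerA, if_neg h]
      refine ⟨le_refl j, h, fun tt0 => ?_⟩
      have : tt0 + (ct - ct) - (cm - cm) = tt0 := by ring
      rw [this]

-- Main loop correspondence: from any position i ≥ 1 that is not in the middle of a run,
-- A's outer loop and B's flat loop agree (B's carried rm is then irrelevant).
theorem mainLemma (cs : List Char) (nt : List Int)
    (P : ∀ i : Nat, i < cs.length → 1 ≤ i →
        cs.getD (i-1) ' ' = cs.getD i ' ' →
        (i < nt.length ∧ 0 ≤ nt.getD (i-1) 0 ∧ 0 ≤ nt.getD i 0)) :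
    ∀ (f i : Nat) (mt rm : Int), cs.length - i ≤ f → 1 ≤ i →
      (i < cs.length → cs.getD (i-1) ' ' = cs.getD i ' ' →
        (i = 1 ∨ cs.getD (i-2) ' ' ≠ cs.getD (i-1) ' ')) →
      outerA cs nt f i mt = loopB cs nt cs.length i mt rm := by
  intro f
  induction f with
  | zero =>
    intro i mt rm hf h1 hso
    rw [loopB_stop cs nt _ i mt rm (by omega)]
    rfl
  | succ a ih =>
    intro i mt rm hf h1 hso
    by_cases hi : i < cs.length
    · by_cases heq : cs.getD (i-1) ' ' = cs.getD i ' '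
      · obtain ⟨hlen, ha, hb⟩ := P i hi h1 heq
        obtain ⟨c, hc⟩ : ∃ c, cs.length = c + 1 := ⟨cs.length - 1, by omega⟩
        have hmax0 : max (max (nt.getD (i-1) 0) (nt.getD i 0)) 0
            = max (nt.getD (i-1) 0) (nt.getD i 0) :=
          max_eq_left (le_trans ha (le_max_left _ _))
        -- peel the first iteration of A's inner loop
        have hinner1 : innerA cs nt cs.length i 0 (nt.getD (i-1) 0) =
            innerA cs nt c (i+1) (max (nt.getD (i-1) 0) (nt.getD i 0))
              (nt.getD (i-1) 0 + nt.getD i 0) := by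
          conv_lhs => rw [hc]
          simp only [innerA, if_pos (And.intro hi heq)]
          rw [hmax0]
        have e1 : i + 1 - 2 = i - 1 := by omega
        have e2 : i + 1 - 1 = i := by omega
        have key := innerChar cs nt c (i+1) (nt.getD (i-1) 0 + nt.getD i 0)
            (max (nt.getD (i-1) 0) (nt.getD i 0)) (by omega) (by omega)
            (by rw [e1, e2]; exact heq) (by rw [e2]; exact le_max_right _ _)
        set r := innerA cs nt c (i+1) (max (nt.getD (i-1) 0) (nt.getD i 0))
            (nt.getD (i-1) 0 + nt.getD i 0) with hr
        obtain ⟨k1, k2, k3⟩ := key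
        -- A side: one outer step
        simp only [outerA, if_pos hi, if_pos heq, hinner1]
        -- B side: one flat step (a run start, so rm is reset to neededTime[i-1])
        conv_rhs => rw [hc]
        conv_rhs => simp only [loopB, if_pos hi, if_pos heq.symm, if_pos (hso hi heq)]
        rw [loopB_fuel cs nt c cs.length (i+1) _ _ (by omega) (by omega)]
        rw [k3 (mt + min (nt.getD (i-1) 0) (nt.getD i 0))]
        rw [ih r.2.2 (mt + (r.1 - r.2.1)) r.2.1 (by omega) (by omega)
            (fun hlt hchar => absurd ⟨hlt, hchar⟩ k2)]
        have hmm : min (nt.getD (i-1) 0) (nt.getD i 0) + max (nt.getD (i-1) 0) (nt.getD i 0)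
            = nt.getD (i-1) 0 + nt.getD i 0 := min_add_max _ _
        have hacc : mt + (r.1 - r.2.1)
            = mt + min (nt.getD (i-1) 0) (nt.getD i 0)
              + (r.1 - (nt.getD (i-1) 0 + nt.getD i 0))
              - (r.2.1 - max (nt.getD (i-1) 0) (nt.getD i 0)) := by
          omega
        rw [hacc]
      · obtain ⟨c, hc⟩ : ∃ c, cs.length = c + 1 := ⟨cs.length - 1, by omega⟩
        simp only [outerA, if_pos hi, if_neg heq]
        conv_rhs => rw [hc]
        conv_rhs => simp only [loopB, if_pos hi, if_neg (fun hcc => heq (Eq.symm hcc))]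
        rw [loopB_fuel cs nt c cs.length (i+1) _ _ (by omega) (by omega)]
        apply ih (i+1) mt rm (by omega) (by omega)
        intro _ _
        right
        have e1 : i + 1 - 2 = i - 1 := by omega
        have e2 : i + 1 - 1 = i := by omega
        rw [e1, e2]
        exact heq
    · rw [loopB_stop cs nt _ i mt rm hi]
      simp [outerA, hi]

-- ===== VERDICT (by name: the statement is the Claim_ definition above) =====
theorem minCostOptimized_spec : Claim_equal_minCostOptimized := by
  intro colors neededTime _ hp
  unfold Spec_minCostOptimized minCostOptimized minCostOptimized_alt
  exact mainLemma colors.toList neededTime hp colors.toList.length 1 0 0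
    (by omega) (le_refl 1) (fun _ _ => Or.inl rfl)
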